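-- pv_equiv track=rewrite | github.com/thiyagarajan2002/strpy | strpy.py | encodeing
-- ===== SOURCE A (Python) =====
-- def encodeing(string):
--     ls=[]
--     for i in string:
--         if ord(i)>=65 and ord(i)<=87:
--             ls.append(chr(ord(i)+3))
--         elif ord(i)>=97 and ord(i)<=119:
--             ls.append(chr(ord(i)+3))
--         else:
--             if ord(i)==88:
--                 ls.append(chr(65))
--             elif ord(i)==89:
--                 ls.append(chr(66))
--             elif ord(i)==90:
--                 ls.append(chr(67))
--             elif ord(i)==120:
--                 ls.append(chr(97))
--             elif ord(i)==121:
--                 ls.append(chr(98))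
--             elif ord(i)==122:
--                 ls.append(chr(99))
--     string1=''
--     for i in ls:
--         string1=string1+i
--     return string1
-- ===== SOURCE B (Python) =====
-- def encodeing(string):
--     upper = "ABCDEFGHIJKLMNOPQRSTUVWXYZ"
--     lower = "abcdefghijklmnopqrstuvwxyz"
--     table = {}
--     for alpha in (upper, lower):
--         for i, c in enumerate(alpha):
--             table[c] = alpha[(i + 3) % 26]
--     return ''.join(table[c] for c in string if c in table)
-- ===== Notes on version B (the rewrite author's own statement) =====
-- stated objective: idiomatic
-- what changed: Replaces A's per-character 8-branch range/wrap ladder plus a separate quadratic string-concatenation loop with a 52-entry Caesar table precomputed once via (i+3) mod 26 over the two alphabets, then a single filtered-lookup join pass.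
import Mathlib
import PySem

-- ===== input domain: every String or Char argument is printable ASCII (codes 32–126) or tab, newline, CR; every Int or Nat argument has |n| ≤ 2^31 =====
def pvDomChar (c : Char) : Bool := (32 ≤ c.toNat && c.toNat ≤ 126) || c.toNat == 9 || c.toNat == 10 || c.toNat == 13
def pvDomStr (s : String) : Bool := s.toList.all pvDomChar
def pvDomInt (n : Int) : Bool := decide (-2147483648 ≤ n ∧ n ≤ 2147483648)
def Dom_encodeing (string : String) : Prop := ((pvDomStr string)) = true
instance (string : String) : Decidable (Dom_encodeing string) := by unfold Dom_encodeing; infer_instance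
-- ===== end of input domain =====

-- B replaces A's per-character range/wrap branch ladder and separate concatenation loop with a
-- 52-entry Caesar table built once by modular arithmetic, then one filtered lookup pass (idiomatic).

-- ===== PORT A =====
-- the body of A's first loop: append the shifted char (branch ladder, explicit wrap cases) or nothing
def encA_step (ls : List Char) (i : Char) : List Char :=
  if 65 ≤ i.toNat ∧ i.toNat ≤ 87 then ls ++ [Char.ofNat (i.toNat + 3)]
  else if 97 ≤ i.toNat ∧ i.toNat ≤ 119 then ls ++ [Char.ofNat (i.toNat + 3)]
  else if i.toNat = 88 then ls ++ [Char.ofNat 65]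
  else if i.toNat = 89 then ls ++ [Char.ofNat 66]
  else if i.toNat = 90 then ls ++ [Char.ofNat 67]
  else if i.toNat = 120 then ls ++ [Char.ofNat 97]
  else if i.toNat = 121 then ls ++ [Char.ofNat 98]
  else if i.toNat = 122 then ls ++ [Char.ofNat 99]
  else ls

def encodeing (string : String) : String :=
  let ls := string.toList.foldl encA_step []
  let string1 := ls.foldl (fun s c => s ++ [c]) ([] : List Char)
  String.mk string1

-- ===== PORT B =====
def pvAlphas : List (List Char) :=
  ["ABCDEFGHIJKLMNOPQRSTUVWXYZ".toList, "abcdefghijklmnopqrstuvwxyz".toList]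

-- table[c] = alpha[(i + 3) % 26]; the index is provably in range, so the .getD default is unreachable
def pvTable : PySem.Dict Char Char :=
  pvAlphas.foldl
    (fun t alpha =>
      (PySem.List.enumerate alpha).foldl
        (fun t p => t.insert p.2 ((PySem.List.pyGet? alpha (PySem.Int.mod (p.1 + 3) 26)).getD 'A'))
        t)
    PySem.Dict.empty

def encodeing_alt (string : String) : String :=
  String.mk (string.toList.filterMap (fun c => pvTable.get? c))

-- ===== PRECONDITION & SPEC =====
def Spec_encodeing (string : String) (out : String) : Prop := out = encodeing_alt string
instance (string : String) (out : String) : Decidable (Spec_encodeing string out) := by unfold Spec_encodeing; infer_instance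

-- ===== CLAIM (what is proved, stated in full; the proofs are below) =====
def Claim_equal_encodeing : Prop := ∀ (string : String), Dom_encodeing string → Spec_encodeing string (encodeing string)

-- ===== LEMMAS AND PROOFS =====

-- what A appends for one character, as an Option
def expA (i : Char) : Option Char :=
  if 65 ≤ i.toNat ∧ i.toNat ≤ 87 then some (Char.ofNat (i.toNat + 3))
  else if 97 ≤ i.toNat ∧ i.toNat ≤ 119 then some (Char.ofNat (i.toNat + 3))
  else if i.toNat = 88 then some (Char.ofNat 65)
  else if i.toNat = 89 then some (Char.ofNat 66)
  else if i.toNat = 90 then some (Char.ofNat 67)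
  else if i.toNat = 120 then some (Char.ofNat 97)
  else if i.toNat = 121 then some (Char.ofNat 98)
  else if i.toNat = 122 then some (Char.ofNat 99)
  else none

theorem encA_step_eq (ls : List Char) (i : Char) :
    encA_step ls i = ls ++ (expA i).toList := by
  unfold encA_step expA
  split_ifs <;> simp

theorem foldl_encA_step (l : List Char) (acc : List Char) :
    l.foldl encA_step acc = acc ++ l.filterMap expA := by
  induction l generalizing acc with
  | nil => simp
  | cons c l ih =>
      simp only [List.foldl_cons, encA_step_eq, ih, List.filterMap_cons]
      cases h : expA c <;> simp

theorem foldl_concat (l : List Char) (acc : List Char) :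
    l.foldl (fun s c => s ++ [c]) acc = acc ++ l := by
  induction l generalizing acc with
  | nil => simp
  | cons c l ih => simp [ih]

set_option maxRecDepth 4000 in
theorem table_small (n : Nat) (h : n ∈ List.range 127) :
    pvTable.get? (Char.ofNat n) = expA (Char.ofNat n) := by
  revert n h; decide

theorem table_eq_expA (c : Char) (hc : pvDomChar c = true) :
    pvTable.get? c = expA c := by
  have hlt : c.toNat < 127 := by
    unfold pvDomChar at hc
    simp only [Bool.or_eq_true, Bool.and_eq_true, decide_eq_true_eq, beq_iff_eq] at hc
    omega
  have := table_small c.toNat (List.mem_range.mpr hlt)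
  rwa [Char.ofNat_toNat] at this

-- ===== VERDICT (by name: the statement is the Claim_ definition above) =====
theorem encodeing_spec : Claim_equal_encodeing := by
  intro s hdom
  unfold Spec_encodeing encodeing encodeing_alt
  simp only [foldl_encA_step, foldl_concat, List.nil_append]
  have hall : ∀ c ∈ s.toList, expA c = pvTable.get? c := by
    intro c hc
    have : pvDomChar c = true := by
      have := hdom; unfold Dom_encodeing pvDomStr at this
      exact (List.all_eq_true.mp this) c hc
    exact (table_eq_expA c this).symm
  rw [List.filterMap_congr hall]
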